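-- pv_equiv track=rewrite | github.com/CYLNXD/Wezea | backend/app/compliance_mapper.py | _check_tls
-- ===== SOURCE A (Python) =====
-- _SEV_RANK: dict[str, int] = {"LOW": 1, "MEDIUM": 2, "HIGH": 3, "CRITICAL": 4}
--
-- def _sev(finding: dict | object) -> int:
--     """Retourne le rang de sévérité d'un finding (0 si INFO ou inconnu)."""
--     if isinstance(finding, dict):
--         return _SEV_RANK.get(str(finding.get("severity", "")), 0)
--     return _SEV_RANK.get(str(getattr(finding, "severity", "")), 0)
--
-- def _title(finding: dict | object) -> str:
--     if isinstance(finding, dict):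
--         return str(finding.get("title", ""))
--     return str(getattr(finding, "title", ""))
--
-- def _title_lower(finding: dict | object) -> str:
--     return _title(finding).lower()
--
-- def _check_tls(findings: list) -> str:
--     """Protocole TLS à jour."""
--     if any(
--         any(w in _title_lower(f) for w in ["tls 1.0", "tls 1.1", "tlsv1.0", "tlsv1.1", "deprecated", "cipher faible", "weak cipher"])
--         and _sev(f) >= 2
--         for f in findings
--     ):
--         return "fail"
--     if any(
--         any(w in _title_lower(f) for w in ["perfect forward", "pfs"])
--         and _sev(f) >= 2
--         for f in findings
--     ):
--         return "warn"
--     return "pass"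
-- ===== SOURCE B (Python) =====
-- _SEV_RANK = {"LOW": 1, "MEDIUM": 2, "HIGH": 3, "CRITICAL": 4}
--
-- _FAIL_KWS = ["tls 1.0", "tls 1.1", "tlsv1.0", "tlsv1.1", "deprecated", "cipher faible", "weak cipher"]
--
-- def _check_tls(findings: list) -> str:
--     """Protocole TLS à jour: single pass with early 'fail' return and a warn flag."""
--     warn_found = False
--     for f in findings:
--         if _SEV_RANK.get(str(f.get("severity", "")), 0) >= 2:
--             t = str(f.get("title", "")).lower()
--             if any(w in t for w in _FAIL_KWS):
--                 return "fail"
--             if "perfect forward" in t or "pfs" in t: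
--                 warn_found = True
--     return "warn" if warn_found else "pass"
-- ===== Notes on version B (the rewrite author's own statement) =====
-- stated objective: alternative
-- what changed: Replaced the two sequential any()-scans over findings with one explicit loop that computes each finding's severity and lowercased title once, returns 'fail' early, and carries a warn_found flag resolved after the loop.
import Mathlib
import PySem

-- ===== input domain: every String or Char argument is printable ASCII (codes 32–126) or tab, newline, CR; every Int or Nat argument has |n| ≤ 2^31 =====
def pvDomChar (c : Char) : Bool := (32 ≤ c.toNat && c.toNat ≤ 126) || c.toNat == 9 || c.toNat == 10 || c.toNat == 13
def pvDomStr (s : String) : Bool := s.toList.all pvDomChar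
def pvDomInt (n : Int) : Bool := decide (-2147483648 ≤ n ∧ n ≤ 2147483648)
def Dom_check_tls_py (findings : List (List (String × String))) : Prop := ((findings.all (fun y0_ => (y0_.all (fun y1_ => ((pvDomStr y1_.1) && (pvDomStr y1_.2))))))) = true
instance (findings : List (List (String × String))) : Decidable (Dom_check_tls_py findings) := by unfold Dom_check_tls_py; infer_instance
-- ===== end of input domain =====

-- B replaces A's two sequential any() scans by a single pass with an early 'fail' return and a warn flag (alternative decomposition, same cost).
-- Findings are dicts (association lists); A's non-dict object branch is outside the type and not ported.

-- ===== PORT A =====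
-- dict.get(key, default) on an association list: first matching key (Python dict has unique keys)
def pvDictGetA (f : List (String × String)) (key dflt : String) : String :=
  ((f.find? (fun p => p.1 == key)).map (fun p => p.2)).getD dflt

-- _SEV_RANK.get(s, 0) on the literal table
def pvSevRankGet (s : String) : Int :=
  ((([("LOW", (1 : Int)), ("MEDIUM", 2), ("HIGH", 3), ("CRITICAL", 4)]).find?
    (fun p => p.1 == s)).map (fun p => p.2)).getD 0

def pvSevA (f : List (String × String)) : Int :=
  pvSevRankGet (pvDictGetA f "severity" "")

def pvTitleLowerA (f : List (String × String)) : String :=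
  PySem.Str.lower (pvDictGetA f "title" "")

def check_tls_py (findings : List (List (String × String))) : String :=
  if findings.any (fun f =>
      (["tls 1.0", "tls 1.1", "tlsv1.0", "tlsv1.1", "deprecated", "cipher faible", "weak cipher"].any
        (fun w => PySem.Str.isIn w (pvTitleLowerA f))) && decide (2 ≤ pvSevA f)) then
    "fail"
  else if findings.any (fun f =>
      (["perfect forward", "pfs"].any (fun w => PySem.Str.isIn w (pvTitleLowerA f))) && decide (2 ≤ pvSevA f)) then
    "warn"
  else
    "pass"

-- ===== PORT B =====
def pvFailKws : List String :=
  ["tls 1.0", "tls 1.1", "tlsv1.0", "tlsv1.1", "deprecated", "cipher faible", "weak cipher"]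

def pvDictGetB (f : List (String × String)) (key dflt : String) : String :=
  ((f.find? (fun p => p.1 == key)).map (fun p => p.2)).getD dflt

def pvSevB (f : List (String × String)) : Int :=
  ((([("LOW", (1 : Int)), ("MEDIUM", 2), ("HIGH", 3), ("CRITICAL", 4)]).find?
    (fun p => p.1 == pvDictGetB f "severity" "")).map (fun p => p.2)).getD 0

def pvTitleLowerB (f : List (String × String)) : String :=
  PySem.Str.lower (pvDictGetB f "title" "")

-- the single-pass loop of Source B: early return "fail", warn flag carried through
def pvLoopB : List (List (String × String)) → Bool → String
  | [], warnFound => if warnFound then "warn" else "pass"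
  | f :: rest, warnFound =>
    if decide (2 ≤ pvSevB f) then
      let t := pvTitleLowerB f
      if pvFailKws.any (fun w => PySem.Str.isIn w t) then "fail"
      else if PySem.Str.isIn "perfect forward" t || PySem.Str.isIn "pfs" t then
        pvLoopB rest true
      else pvLoopB rest warnFound
    else pvLoopB rest warnFound

def check_tls_py_alt (findings : List (List (String × String))) : String :=
  pvLoopB findings false

-- ===== PRECONDITION & SPEC =====
def Spec_check_tls_py (findings : List (List (String × String))) (out : String) : Prop := out = check_tls_py_alt findings
instance (findings : List (List (String × String))) (out : String) : Decidable (Spec_check_tls_py findings out) := by unfold Spec_check_tls_py; infer_instance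

-- ===== CLAIM (what is proved, stated in full; the proofs are below) =====
def Claim_equal_check_tls_py : Prop := ∀ (findings : List (List (String × String))), Dom_check_tls_py findings → Spec_check_tls_py findings (check_tls_py findings)

-- ===== LEMMAS AND PROOFS =====

-- per-finding conditions, in exactly the shape A's lambdas have
def pvIsFail (f : List (String × String)) : Bool :=
  (pvFailKws.any (fun w => PySem.Str.isIn w (pvTitleLowerB f))) && decide (2 ≤ pvSevB f)

def pvIsWarn (f : List (String × String)) : Bool :=
  (PySem.Str.isIn "perfect forward" (pvTitleLowerB f) || PySem.Str.isIn "pfs" (pvTitleLowerB f))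
    && decide (2 ≤ pvSevB f)

theorem pvLoopB_step (f : List (String × String)) (rest : List (List (String × String))) (warn : Bool) :
    pvLoopB (f :: rest) warn =
      if pvIsFail f then "fail" else pvLoopB rest (warn || pvIsWarn f) := by
  cases hs : decide (2 ≤ pvSevB f) <;>
    cases hf : pvFailKws.any (fun w => PySem.Str.isIn w (pvTitleLowerB f)) <;>
    cases hw : (PySem.Str.isIn "perfect forward" (pvTitleLowerB f)
        || PySem.Str.isIn "pfs" (pvTitleLowerB f)) <;>
    simp only [pvLoopB, pvIsFail, pvIsWarn, hs, hf, hw, Bool.and_false, Bool.and_true,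
      Bool.or_false, Bool.or_true, if_true, if_false, Bool.false_eq_true]

theorem pvLoopB_char (l : List (List (String × String))) (warn : Bool) :
    pvLoopB l warn =
      if l.any pvIsFail then "fail"
      else if warn || l.any pvIsWarn then "warn" else "pass" := by
  induction l generalizing warn with
  | nil => simp [pvLoopB]
  | cons f rest ih =>
    rw [pvLoopB_step, ih]
    cases hf : pvIsFail f <;> cases hw : pvIsWarn f <;>
      simp [List.any_cons, hf, hw]

-- ===== VERDICT (by name: the statement is the Claim_ definition above) =====
theorem check_tls_py_spec : Claim_equal_check_tls_py := by
  intro findings _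
  show check_tls_py findings = check_tls_py_alt findings
  rw [check_tls_py_alt, pvLoopB_char, Bool.false_or]
  have h1 : pvTitleLowerA = pvTitleLowerB := rfl
  have h2 : pvSevA = pvSevB := rfl
  have hfail : (fun f => (["tls 1.0", "tls 1.1", "tlsv1.0", "tlsv1.1", "deprecated",
        "cipher faible", "weak cipher"].any (fun w => PySem.Str.isIn w (pvTitleLowerA f)))
        && decide (2 ≤ pvSevA f)) = pvIsFail := by
    funext f
    simp [pvIsFail, pvFailKws, h1, h2]
  have hwarn : (fun f => (["perfect forward", "pfs"].any
        (fun w => PySem.Str.isIn w (pvTitleLowerA f))) && decide (2 ≤ pvSevA f)) = pvIsWarn := by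
    funext f
    simp [pvIsWarn, h1, h2]
  rw [check_tls_py, hfail, hwarn]
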